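-- pv_equiv track=rewrite | github.com/georgezefko/Builder-Catalogue | src/collaboration_checker.py | can_complete_set
-- ===== SOURCE A (Python) =====
-- def can_complete_set(inventories, set_inventory):
--     combined = {}
--     for inv in inventories:
--
--         for piece_id, colors in inv.items():
--
--             for color, count in colors.items():
--
--                 if piece_id not in combined:
--                     combined[piece_id] = {}
--
--                 if color not in combined[piece_id]:
--                     combined[piece_id][color] = 0
--
--                 combined[piece_id][color] += count
--
--     for piece_id, colors in set_inventory.items():
--
--         for color, count in colors.items():
--
--             if piece_id in combined and color in combined[piece_id]:
--                 combined_count = combined[piece_id][color]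
--             else:
--                 combined_count = 0
--             # Check if the combined inventory has enough count of each piece and color
--             if combined_count < count:
--                 return False
--     return True
-- ===== SOURCE B (Python) =====
-- def can_complete_set(inventories, set_inventory):
--     for piece_id, colors in set_inventory.items():
--         for color, count in colors.items():
--             total = sum(inv.get(piece_id, {}).get(color, 0) for inv in inventories)
--             if total < count:
--                 return False
--     return True
-- ===== Notes on version B (the rewrite author's own statement) =====
-- stated objective: simpler
-- what changed: B never materializes the merged 'combined' nested dict: for each required (piece, color, count) it computes the available total by summing inv.get(piece,{}).get(color,0) over all inventories on the fly, returning False on the first shortfall.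
import Mathlib
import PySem

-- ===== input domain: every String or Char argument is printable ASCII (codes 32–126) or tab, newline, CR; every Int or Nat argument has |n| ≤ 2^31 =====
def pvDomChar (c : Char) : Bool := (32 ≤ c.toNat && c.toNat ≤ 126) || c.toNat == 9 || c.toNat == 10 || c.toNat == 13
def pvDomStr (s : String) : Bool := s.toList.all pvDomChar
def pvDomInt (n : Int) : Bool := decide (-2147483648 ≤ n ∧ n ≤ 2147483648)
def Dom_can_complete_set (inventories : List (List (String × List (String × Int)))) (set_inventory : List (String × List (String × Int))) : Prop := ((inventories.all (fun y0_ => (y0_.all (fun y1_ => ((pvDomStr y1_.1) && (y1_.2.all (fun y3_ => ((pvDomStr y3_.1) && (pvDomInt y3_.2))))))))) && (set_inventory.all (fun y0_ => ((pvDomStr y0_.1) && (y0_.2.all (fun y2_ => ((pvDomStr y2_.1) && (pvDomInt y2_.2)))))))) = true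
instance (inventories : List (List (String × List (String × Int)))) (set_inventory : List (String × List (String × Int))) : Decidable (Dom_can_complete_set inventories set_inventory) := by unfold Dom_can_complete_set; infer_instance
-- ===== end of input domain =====

-- B checks each requirement by summing availability over the inventories directly, instead of
-- first building A's merged nested dict; objective: simpler (no index is materialized).

-- dict lookup on an association list: first match, else default  (port of Python's dict.get)
def pvLookupD {α : Type} (xs : List (String × α)) (k : String) (d : α) : α :=
  match xs.find? (fun e => e.1 == k) with
  | some e => e.2
  | none => d

-- dict assignment d[k] = v on an association list: overwrite first match in place, else append
def pvDUpd {α : Type} : List (String × α) → String → α → List (String × α)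
  | [], k, v => [(k, v)]
  | e :: rest, k, v => if e.1 == k then (k, v) :: rest else e :: pvDUpd rest k v

-- ===== PORT A =====
-- body of A's triple build loop: the two membership guards, then combined[piece_id][color] += count
def pvStepA (comb : List (String × List (String × Int))) (p c : String) (cnt : Int) :
    List (String × List (String × Int)) :=
  let comb1 := if (comb.find? (fun e => e.1 == p)).isSome then comb else pvDUpd comb p []
  let d := pvLookupD comb1 p []
  let d1 := if (d.find? (fun e => e.1 == c)).isSome then d else pvDUpd d c 0
  pvDUpd comb1 p (pvDUpd d1 c (pvLookupD d1 c 0 + cnt))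

def pvBuild (inventories : List (List (String × List (String × Int)))) :
    List (String × List (String × Int)) :=
  inventories.foldl
    (fun comb inv =>
      inv.foldl (fun comb pe => pe.2.foldl (fun comb ce => pvStepA comb pe.1 ce.1 ce.2) comb) comb)
    []

-- combined_count: combined[p][c] if both keys present, else 0
def pvLookA (comb : List (String × List (String × Int))) (p c : String) : Int :=
  if (comb.find? (fun e => e.1 == p)).isSome
      && ((pvLookupD comb p []).find? (fun e => e.1 == c)).isSome then
    pvLookupD (pvLookupD comb p []) c 0
  else 0

def can_complete_set (inventories : List (List (String × List (String × Int)))) (set_inventory : List (String × List (String × Int))) : Bool :=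
  set_inventory.all (fun pe =>
    pe.2.all (fun ce => !decide (pvLookA (pvBuild inventories) pe.1 ce.1 < ce.2)))

-- ===== PORT B =====
-- total = sum(inv.get(piece_id, {}).get(color, 0) for inv in inventories)
def pvTotal (inventories : List (List (String × List (String × Int)))) (p c : String) : Int :=
  inventories.foldl (fun acc inv => acc + pvLookupD (pvLookupD inv p []) c 0) 0

def can_complete_set_alt (inventories : List (List (String × List (String × Int)))) (set_inventory : List (String × List (String × Int))) : Bool :=
  set_inventory.all (fun pe =>
    pe.2.all (fun ce => !decide (pvTotal inventories pe.1 ce.1 < ce.2)))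

-- ===== PRECONDITION & SPEC =====
-- Pre_ restricts the association lists inside `inventories` to valid renderings of Python dicts:
-- no duplicate piece keys within one inventory and no duplicate color keys within one piece's
-- color dict (Python dicts cannot carry duplicate keys, so this excludes no input A ever receives;
-- with duplicates, A's port would add every entry while B's first-match lookup reads only one).
def Pre_can_complete_set (inventories : List (List (String × List (String × Int)))) (_set_inventory : List (String × List (String × Int))) : Prop :=
  ∀ inv ∈ inventories, (inv.map Prod.fst).Nodup ∧ ∀ e ∈ inv, (e.2.map Prod.fst).Nodup
instance (inventories : List (List (String × List (String × Int)))) (set_inventory : List (String × List (String × Int))) : Decidable (Pre_can_complete_set inventories set_inventory) := by unfold Pre_can_complete_set; infer_instance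

def pvWitness_can_complete_set : (List (List (String × List (String × Int)))) × (List (String × List (String × Int))) :=
  ([[("3001", [("red", 2), ("blue", 1)])], [("3001", [("red", 1)])]], [("3001", [("red", 3)])])

def Spec_can_complete_set (inventories : List (List (String × List (String × Int)))) (set_inventory : List (String × List (String × Int))) (out : Bool) : Prop := out = can_complete_set_alt inventories set_inventory
instance (inventories : List (List (String × List (String × Int)))) (set_inventory : List (String × List (String × Int))) (out : Bool) : Decidable (Spec_can_complete_set inventories set_inventory out) := by unfold Spec_can_complete_set; infer_instance

-- ===== CLAIM (what is proved, stated in full; the proofs are below) =====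
def Claim_equal_can_complete_set : Prop := ∀ (inventories : List (List (String × List (String × Int)))) (set_inventory : List (String × List (String × Int))), Dom_can_complete_set inventories set_inventory → Pre_can_complete_set inventories set_inventory → Spec_can_complete_set inventories set_inventory (can_complete_set inventories set_inventory)

-- ===== LEMMAS AND PROOFS =====

theorem find?_pvDUpd_self {α : Type} (xs : List (String × α)) (q : String) (v : α) :
    (pvDUpd xs q v).find? (fun e => e.1 == q) = some (q, v) := by
  induction xs with
  | nil => simp [pvDUpd]
  | cons e rest ih =>
    by_cases h : e.1 = q
    · simp [pvDUpd, h]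
    · simp [pvDUpd, h, ih]

theorem find?_pvDUpd_ne {α : Type} (xs : List (String × α)) (q : String) (v : α) (p : String)
    (h : p ≠ q) :
    (pvDUpd xs q v).find? (fun e => e.1 == p) = xs.find? (fun e => e.1 == p) := by
  induction xs with
  | nil => simp [pvDUpd, List.find?, Ne.symm h]
  | cons e rest ih =>
    by_cases h1 : e.1 = q
    · have hqp : (q == p) = false := by simp [Ne.symm h]
      simp [pvDUpd, h1, List.find?, hqp]
    · simp [pvDUpd, h1, List.find?, ih]

theorem lookupD_pvDUpd {α : Type} (xs : List (String × α)) (q : String) (v : α) (p : String)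
    (d : α) :
    pvLookupD (pvDUpd xs q v) p d = if p = q then v else pvLookupD xs p d := by
  by_cases h : p = q
  · subst h; simp [pvLookupD, find?_pvDUpd_self]
  · simp [pvLookupD, find?_pvDUpd_ne xs q v p h, h]

theorem lookupD_absent {α : Type} (xs : List (String × α)) (k : String) (d : α)
    (h : xs.find? (fun e => e.1 == k) = none) : pvLookupD xs k d = d := by
  simp [pvLookupD, h]

-- the two membership guards of A insert only the default, so lookups are unchanged
theorem lookupD_ensure {α : Type} (xs : List (String × α)) (k x : String) (d : α) :
    pvLookupD (if (xs.find? (fun e => e.1 == k)).isSome then xs else pvDUpd xs k d) x d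
      = pvLookupD xs x d := by
  cases h : xs.find? (fun e => e.1 == k) with
  | some e => simp [pvLookupD]
  | none =>
    simp only [Option.isSome_none, Bool.false_eq_true, if_false, lookupD_pvDUpd]
    by_cases hx : x = k
    · subst hx; simp [lookupD_absent xs x d h]
    · simp [hx]

-- combined_count is a double first-match lookup with default 0
theorem pvLookA_eq (comb : List (String × List (String × Int))) (p c : String) :
    pvLookA comb p c = pvLookupD (pvLookupD comb p []) c 0 := by
  cases h1 : comb.find? (fun e => e.1 == p) with
  | none => simp [pvLookA, pvLookupD, h1]
  | some e =>
    cases h2 : e.2.find? (fun e => e.1 == c) with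
    | none => simp [pvLookA, pvLookupD, h1, h2]
    | some f => simp [pvLookA, pvLookupD, h1, h2]

-- shorthand used by the proofs only
def pvL (comb : List (String × List (String × Int))) (p c : String) : Int :=
  pvLookupD (pvLookupD comb p []) c 0

theorem pvL_stepA (comb : List (String × List (String × Int))) (q c' : String) (cnt : Int)
    (p c : String) :
    pvL (pvStepA comb q c' cnt) p c = pvL comb p c + (if p = q ∧ c = c' then cnt else 0) := by
  simp only [pvL, pvStepA, lookupD_pvDUpd]
  by_cases hpq : p = q
  · subst hpq
    simp only [lookupD_ensure, true_and]
    by_cases hc : c = c' <;> simp [hc, lookupD_ensure, lookupD_pvDUpd]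
  · simp [hpq, lookupD_ensure]

def entrySum (cs : List (String × Int)) (c : String) : Int :=
  (cs.map (fun ce => if ce.1 = c then ce.2 else 0)).sum

def pieceSum (inv : List (String × List (String × Int))) (p c : String) : Int :=
  (inv.map (fun pe => if pe.1 = p then entrySum pe.2 c else 0)).sum

theorem pvL_foldColors (q : String) (cs : List (String × Int))
    (comb : List (String × List (String × Int))) (p c : String) :
    pvL (cs.foldl (fun comb ce => pvStepA comb q ce.1 ce.2) comb) p c
      = pvL comb p c + (if p = q then entrySum cs c else 0) := by
  induction cs generalizing comb with
  | nil => simp [entrySum]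
  | cons ce rest ih =>
    simp only [List.foldl_cons, ih, pvL_stepA, entrySum, List.map_cons, List.sum_cons]
    by_cases hp : p = q
    · by_cases hc : c = ce.1
      · simp [hp, hc, eq_comm]
        ring
      · simp [hp, hc, eq_comm]
    · simp [hp]

theorem pvL_foldInv (inv : List (String × List (String × Int)))
    (comb : List (String × List (String × Int))) (p c : String) :
    pvL (inv.foldl (fun comb pe => pe.2.foldl (fun comb ce => pvStepA comb pe.1 ce.1 ce.2) comb) comb) p c
      = pvL comb p c + pieceSum inv p c := by
  induction inv generalizing comb with
  | nil => simp [pieceSum]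
  | cons pe rest ih =>
    simp only [List.foldl_cons, ih, pvL_foldColors, pieceSum, List.map_cons, List.sum_cons]
    by_cases hp : pe.1 = p
    · simp only [hp]
      ring
    · simp [hp, Ne.symm hp]

theorem pvL_nil (p c : String) : pvL [] p c = 0 := by
  simp [pvL, pvLookupD]

theorem pvL_build (inventories : List (List (String × List (String × Int)))) (p c : String) :
    pvL (pvBuild inventories) p c = (inventories.map (fun inv => pieceSum inv p c)).sum := by
  suffices h : ∀ comb,
      pvL (inventories.foldl
        (fun comb inv =>
          inv.foldl (fun comb pe => pe.2.foldl (fun comb ce => pvStepA comb pe.1 ce.1 ce.2) comb) comb)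
        comb) p c = pvL comb p c + (inventories.map (fun inv => pieceSum inv p c)).sum by
    simpa [pvBuild, pvL_nil] using h []
  induction inventories with
  | nil => simp
  | cons inv rest ih =>
    intro comb
    simp only [List.foldl_cons, ih, pvL_foldInv, List.map_cons, List.sum_cons]
    ring

theorem entrySum_not_mem (cs : List (String × Int)) (c : String)
    (h : c ∉ cs.map Prod.fst) : entrySum cs c = 0 := by
  induction cs with
  | nil => simp [entrySum]
  | cons ce rest ih =>
    rw [List.map_cons] at h
    have h1 : ce.1 ≠ c := fun e => h (by simp [e])
    have h2 : c ∉ rest.map Prod.fst := fun m => h (List.mem_cons_of_mem _ m)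
    simp only [entrySum, List.map_cons, List.sum_cons, if_neg h1, zero_add]
    exact ih h2

theorem entrySum_nodup (cs : List (String × Int)) (c : String)
    (h : (cs.map Prod.fst).Nodup) : entrySum cs c = pvLookupD cs c 0 := by
  induction cs with
  | nil => simp [entrySum, pvLookupD]
  | cons ce rest ih =>
    rw [List.map_cons, List.nodup_cons] at h
    by_cases hc : ce.1 = c
    · have e1 : entrySum (ce :: rest) c = ce.2 + entrySum rest c := by
        simp [entrySum, hc]
      have hb : (ce.1 == c) = true := by simp [hc]
      have e2 : pvLookupD (ce :: rest) c 0 = ce.2 := by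
        simp [pvLookupD, List.find?, hb]
      rw [e1, e2, entrySum_not_mem rest c (hc ▸ h.1)]; ring
    · have e1 : entrySum (ce :: rest) c = entrySum rest c := by
        simp [entrySum, hc]
      have hb : (ce.1 == c) = false := by simp [hc]
      have e2 : pvLookupD (ce :: rest) c 0 = pvLookupD rest c 0 := by
        simp [pvLookupD, List.find?, hb]
      rw [e1, e2]; exact ih h.2

theorem pieceSum_not_mem (inv : List (String × List (String × Int))) (p c : String)
    (h : p ∉ inv.map Prod.fst) : pieceSum inv p c = 0 := by
  induction inv with
  | nil => simp [pieceSum]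
  | cons pe rest ih =>
    rw [List.map_cons] at h
    have h1 : pe.1 ≠ p := fun e => h (by simp [e])
    have h2 : p ∉ rest.map Prod.fst := fun m => h (List.mem_cons_of_mem _ m)
    simp only [pieceSum, List.map_cons, List.sum_cons, if_neg h1, zero_add]
    exact ih h2

theorem pieceSum_nodup (inv : List (String × List (String × Int))) (p c : String)
    (h1 : (inv.map Prod.fst).Nodup) (h2 : ∀ e ∈ inv, (e.2.map Prod.fst).Nodup) :
    pieceSum inv p c = pvLookupD (pvLookupD inv p []) c 0 := by
  induction inv with
  | nil => simp [pieceSum, pvLookupD]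
  | cons pe rest ih =>
    rw [List.map_cons, List.nodup_cons] at h1
    by_cases hp : pe.1 = p
    · have e1 : pieceSum (pe :: rest) p c = entrySum pe.2 c + pieceSum rest p c := by
        simp [pieceSum, hp]
      have hb : (pe.1 == p) = true := by simp [hp]
      have e2 : pvLookupD (pe :: rest) p [] = pe.2 := by
        simp [pvLookupD, List.find?, hb]
      rw [e1, e2, pieceSum_not_mem rest p c (hp ▸ h1.1),
        entrySum_nodup pe.2 c (h2 pe (by simp))]
      ring
    · have e1 : pieceSum (pe :: rest) p c = pieceSum rest p c := by
        simp [pieceSum, hp]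
      have hb : (pe.1 == p) = false := by simp [hp]
      have e2 : pvLookupD (pe :: rest) p [] = pvLookupD rest p [] := by
        simp [pvLookupD, List.find?, hb]
      rw [e1, e2]
      exact ih h1.2 (fun e he => h2 e (List.mem_cons_of_mem _ he))

theorem total_eq (inventories : List (List (String × List (String × Int)))) (p c : String)
    (hpre : ∀ inv ∈ inventories, (inv.map Prod.fst).Nodup ∧ ∀ e ∈ inv, (e.2.map Prod.fst).Nodup) :
    pvLookA (pvBuild inventories) p c = pvTotal inventories p c := by
  rw [pvLookA_eq]
  show pvL (pvBuild inventories) p c = pvTotal inventories p c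
  rw [pvL_build,
    List.map_congr_left (fun inv hinv => pieceSum_nodup inv p c (hpre inv hinv).1 (hpre inv hinv).2)]
  rw [pvTotal, PySem.List.foldl_add, zero_add]

-- ===== VERDICT (by name: the statement is the Claim_ definition above) =====
theorem can_complete_set_spec : Claim_equal_can_complete_set := by
  intro inventories set_inventory hdom hpre
  unfold Spec_can_complete_set can_complete_set can_complete_set_alt
  have h : ∀ p c, pvLookA (pvBuild inventories) p c = pvTotal inventories p c :=
    fun p c => total_eq inventories p c hpre
  simp only [h]
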